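-- pv_equiv track=rewrite | github.com/zabrocki/multiset_partitions | multisetpartition.py | last_letter_order_msp
-- ===== SOURCE A (Python) =====
-- def last_letter_order_msp( A, B ):
--     r"""
--     EXAMPLES::
--         sage: sorted([[1,1,2],[2],[1],[1,2],[1,1],[-1],[-2],[1,1,-1],[1,1,-2],[1,-1],[1,-1],[1,-2]], key=key_last_letter_order_msp)
--         [[-1],
--          [-2],
--          [1],
--          [1, -1],
--          [1, -1],
--          [1, -2],
--          [1, 1],
--          [1, 1, -1],
--          [1, 1, -2],
--          [1, 1, 2],
--          [2],
--          [1, 2]]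
--     """
--     A = sorted(A)
--     B = sorted(B)
--     if len(A)==0:
--         return int(-1)
--     if len(B)==0:
--         return int(1)
--     if B[-1]>0 and A[-1]<0:
--         return int(-1)
--     if B[-1]<0 and A[-1]>0:
--         return int(1)
--     if B[-1]<0 and A[-1]<0:
--         return last_letter_order_msp([-a for a in A], [-b for b in B])
--     if A[-1]<B[-1]:
--         return int(-1)
--     if A[-1]>B[-1]:
--         return int(1)
--     if A[-1]==B[-1]:
--         return last_letter_order_msp(A[:-1],B[:-1])
-- ===== SOURCE B (Python) =====
-- def last_letter_order_msp(A, B):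
--     # Sort each multiset once (descending), then compare in a single linear pass.
--     ra = sorted(A)
--     ra.reverse()
--     rb = sorted(B)
--     rb.reverse()
--     i = j = 0
--     while True:
--         if i == len(ra):
--             return -1
--         if j == len(rb):
--             return 1
--         a, b = ra[i], rb[j]
--         if b > 0 and a < 0:
--             return -1
--         if b < 0 and a > 0:
--             return 1
--         if b < 0 and a < 0:
--             break  # both remainders are all-negative: compare by negated values
--         if a < b:
--             return -1
--         if a > b:
--             return 1
--         i += 1
--         j += 1
--     # Remainders ra[i:], rb[j:] are all negative and descending; the negated
--     # multisets are compared from their largest element, i.e. from the back.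
--     p, q = len(ra) - 1, len(rb) - 1
--     while True:
--         if p < i:
--             return -1
--         if q < j:
--             return 1
--         if -ra[p] < -rb[q]:
--             return -1
--         if -ra[p] > -rb[q]:
--             return 1
--         p -= 1
--         q -= 1
-- ===== Notes on version B (the rewrite author's own statement) =====
-- stated objective: faster
-- what changed: A re-sorts both (possibly negated) multisets on every recursive call and peels one element per level; B sorts each multiset once and decides with a single linear two-pointer pass (one forward sweep plus, when both remainders are all-negative, one backward sweep).
import Mathlib
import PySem

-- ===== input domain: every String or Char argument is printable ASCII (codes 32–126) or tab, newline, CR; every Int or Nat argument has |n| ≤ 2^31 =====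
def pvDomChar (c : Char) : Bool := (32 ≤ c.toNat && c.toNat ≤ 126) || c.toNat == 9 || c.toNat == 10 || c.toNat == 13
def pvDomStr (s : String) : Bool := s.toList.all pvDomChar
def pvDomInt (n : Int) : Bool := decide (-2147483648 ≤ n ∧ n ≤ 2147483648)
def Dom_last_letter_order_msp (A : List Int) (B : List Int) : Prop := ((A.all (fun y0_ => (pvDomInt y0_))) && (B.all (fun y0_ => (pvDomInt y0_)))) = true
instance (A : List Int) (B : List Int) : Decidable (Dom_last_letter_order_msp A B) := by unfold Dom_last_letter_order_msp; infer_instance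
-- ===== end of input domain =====

-- B replaces A's re-sort-on-every-recursive-call comparison by sorting each
-- multiset once and comparing in a single linear pass.

-- ===== PORT A =====
-- helpers for A's termination measure (used only by the port's termination proof)
def pvFlag (X : List Int) : Nat :=
  if h : PySem.List.sorted X (fun x => x) false = [] then 0
  else if (PySem.List.sorted X (fun x => x) false).getLast h < 0 then 1 else 0

def pvMeas (A B : List Int) : Nat :=
  2 * ((PySem.List.sorted A (fun x => x) false).length
       + (PySem.List.sorted B (fun x => x) false).length) + pvFlag A + pvFlag B

-- termination lemmas, cited by the port's termination proof
theorem pvLe_getLast : ∀ {s : List Int}, s.Pairwise (· ≤ ·) → ∀ (h : s ≠ []), ∀ x ∈ s, x ≤ s.getLast h := by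
  intro s
  induction s with
  | nil => intro _ h; simp at h
  | cons a t ih =>
    intro hp h x hx
    cases t with
    | nil => simp at hx; simp [hx]
    | cons c u =>
      rw [List.getLast_cons (by simp)]
      rcases List.mem_cons.mp hx with hx | hx
      · subst hx
        exact le_trans (List.rel_of_pairwise_cons hp (List.getLast_mem (by simp))) (le_refl _)
      · exact ih hp.of_cons (by simp) x hx

theorem pvSorted_map_neg (s : List Int) (hp : s.Pairwise (· ≤ ·)) :
    PySem.List.sorted (s.map (fun x => -x)) (fun x => x) false = (s.map (fun x => -x)).reverse := by
  apply PySem.List.sorted_id_eq_of_perm_of_pairwise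
  · exact (s.map (fun x => -x)).reverse_perm
  · rw [List.pairwise_reverse, List.pairwise_map]
    exact hp.imp (fun h => by omega)


theorem pvFlag_le_one (X : List Int) : pvFlag X ≤ 1 := by
  unfold pvFlag; split_ifs <;> omega

theorem pvFlag_map_neg (s : List Int) (hp : s.Pairwise (· ≤ ·)) (h : s ≠ [])
    (hl : s.getLast h < 0) : pvFlag (s.map (fun x => -x)) = 0 := by
  unfold pvFlag
  rw [pvSorted_map_neg s hp]
  have hne : (s.map (fun x => -x)).reverse ≠ [] := by simp [h]
  rw [dif_neg hne]
  have h2 : s.map (fun x => -x) ≠ [] := by simp [h]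
  have h3 : (s.map (fun x => -x)).reverse.getLast hne = -(s.head h) := by
    rw [List.getLast_reverse hne]; exact List.head_map h2
  rw [h3]
  have := pvLe_getLast hp h (s.head h) (List.head_mem h)
  rw [if_neg (by omega)]

theorem pvFlag_of_neg (X : List Int) (h : PySem.List.sorted X (fun x => x) false ≠ [])
    (hl : (PySem.List.sorted X (fun x => x) false).getLast h < 0) : pvFlag X = 1 := by
  unfold pvFlag
  rw [dif_neg h, if_pos hl]

def last_letter_order_msp (A : List Int) (B : List Int) : Int :=
  -- Python rebinds A := sorted(A), B := sorted(B); the bound lists are inlined below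
  if hA : PySem.List.sorted A (fun x => x) false = [] then -1
  else if hB : PySem.List.sorted B (fun x => x) false = [] then 1
  else
    if 0 < (PySem.List.sorted B (fun x => x) false).getLast hB ∧
        (PySem.List.sorted A (fun x => x) false).getLast hA < 0 then -1
    else if (PySem.List.sorted B (fun x => x) false).getLast hB < 0 ∧
        0 < (PySem.List.sorted A (fun x => x) false).getLast hA then 1
    else if hneg : (PySem.List.sorted B (fun x => x) false).getLast hB < 0 ∧
        (PySem.List.sorted A (fun x => x) false).getLast hA < 0 then
      last_letter_order_msp ((PySem.List.sorted A (fun x => x) false).map (fun x => -x))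
                            ((PySem.List.sorted B (fun x => x) false).map (fun x => -x))
    else if (PySem.List.sorted A (fun x => x) false).getLast hA <
        (PySem.List.sorted B (fun x => x) false).getLast hB then -1
    else if (PySem.List.sorted B (fun x => x) false).getLast hB <
        (PySem.List.sorted A (fun x => x) false).getLast hA then 1
    else -- Python guards this with `if A[-1]==B[-1]`, the only remaining case
      last_letter_order_msp (PySem.List.slice (PySem.List.sorted A (fun x => x) false) none (some (-1)))
                            (PySem.List.slice (PySem.List.sorted B (fun x => x) false) none (some (-1)))
termination_by pvMeas A B
decreasing_by
  · -- negation branch: lengths unchanged, both flags drop from 1 to 0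
    have hpA := PySem.List.sorted_pairwise A (fun x => x)
    have hpB := PySem.List.sorted_pairwise B (fun x => x)
    simp only [pvMeas]
    rw [pvFlag_map_neg _ hpA hA hneg.2, pvFlag_map_neg _ hpB hB hneg.1,
        pvFlag_of_neg A hA hneg.2, pvFlag_of_neg B hB hneg.1]
    simp [PySem.List.length_sorted]
  · -- drop-last branch: both lengths decrease by one
    simp only [pvMeas, PySem.List.slice_to_neg_one, PySem.List.length_sorted,
      List.length_dropLast]
    rw [PySem.List.sorted_eq_nil_iff] at hA hB
    have h1 : 0 < A.length := List.length_pos_iff.mpr hA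
    have h2 : 0 < B.length := List.length_pos_iff.mpr hB
    have := pvFlag_le_one ((PySem.List.sorted A (fun x => x) false).dropLast)
    have := pvFlag_le_one ((PySem.List.sorted B (fun x => x) false).dropLast)
    omega

-- ===== PORT B =====
-- second loop of Source B: compare the (all-negative) remainders by negated value, from the back
def pvCmpNeg : List Int → List Int → Int
  | [], _ => -1
  | _ :: _, [] => 1
  | x :: xs, y :: ys =>
    if -x < -y then -1 else if -y < -x then 1 else pvCmpNeg xs ys

-- first loop of Source B, over the two descending lists
def pvCmpRev : List Int → List Int → Int
  | [], _ => -1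
  | _ :: _, [] => 1
  | a :: as, b :: bs =>
    if 0 < b ∧ a < 0 then -1
    else if b < 0 ∧ 0 < a then 1
    else if b < 0 ∧ a < 0 then pvCmpNeg ((a :: as).reverse) ((b :: bs).reverse)
    else if a < b then -1
    else if b < a then 1
    else pvCmpRev as bs

def last_letter_order_msp_alt (A : List Int) (B : List Int) : Int :=
  pvCmpRev (PySem.List.sorted A (fun x => x) false).reverse
           (PySem.List.sorted B (fun x => x) false).reverse

-- ===== PRECONDITION & SPEC =====
def Spec_last_letter_order_msp (A : List Int) (B : List Int) (out : Int) : Prop := out = last_letter_order_msp_alt A B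
instance (A : List Int) (B : List Int) (out : Int) : Decidable (Spec_last_letter_order_msp A B out) := by unfold Spec_last_letter_order_msp; infer_instance

-- ===== CLAIM (what is proved, stated in full; the proofs are below) =====
def Claim_equal_last_letter_order_msp : Prop := ∀ (A : List Int) (B : List Int), Dom_last_letter_order_msp A B → Spec_last_letter_order_msp A B (last_letter_order_msp A B)

-- ===== LEMMAS AND PROOFS =====

theorem pvSorted_dropLast (s : List Int) (hp : s.Pairwise (· ≤ ·)) :
    PySem.List.sorted s.dropLast (fun x => x) false = s.dropLast :=
  PySem.List.sorted_eq_self_of_pairwise _ _ (hp.sublist (List.dropLast_sublist s))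

-- on all-negative lists, Source B's first loop over the negated lists is exactly its second loop
theorem pvCmpRev_map_neg : ∀ (s t : List Int), (∀ x ∈ s, x < 0) → (∀ y ∈ t, y < 0) →
    pvCmpRev (s.map (fun x => -x)) (t.map (fun x => -x)) = pvCmpNeg s t := by
  intro s
  induction s with
  | nil => intro t _ _; cases t <;> rfl
  | cons x xs ih =>
    intro t hs ht
    cases t with
    | nil => rfl
    | cons y ys =>
      have hx : x < 0 := hs x (by simp)
      have hy : y < 0 := ht y (by simp)
      simp only [List.map_cons, pvCmpRev, pvCmpNeg]
      rw [if_neg (by omega), if_neg (by omega), if_neg (by omega)]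
      split_ifs with h1 h2
      · rfl
      · rfl
      · exact ih ys (fun a ha => hs a (by simp [ha])) (fun a ha => ht a (by simp [ha]))

-- a nonempty list, reversed, is its last element followed by the reversed dropLast
theorem pvReverse_eq (s : List Int) (h : s ≠ []) :
    s.reverse = s.getLast h :: s.dropLast.reverse := by
  conv_lhs => rw [← List.dropLast_append_getLast h]
  simp

theorem pv_key (A B : List Int) : last_letter_order_msp A B = last_letter_order_msp_alt A B := by
  induction A, B using last_letter_order_msp.induct
  case case1 A B hA =>
    rw [last_letter_order_msp, dif_pos hA]
    unfold last_letter_order_msp_alt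
    rw [hA]
    rfl
  case case2 A B hA hB =>
    rw [last_letter_order_msp, dif_neg hA, dif_pos hB]
    unfold last_letter_order_msp_alt
    rw [pvReverse_eq _ hA, hB]
    rfl
  case case3 A B hA hB h =>
    rw [last_letter_order_msp, dif_neg hA, dif_neg hB, if_pos h]
    unfold last_letter_order_msp_alt
    rw [pvReverse_eq _ hA, pvReverse_eq _ hB]
    simp only [pvCmpRev]
    rw [if_pos h]
  case case4 A B hA hB h1 h =>
    rw [last_letter_order_msp, dif_neg hA, dif_neg hB, if_neg h1, if_pos h]
    unfold last_letter_order_msp_alt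
    rw [pvReverse_eq _ hA, pvReverse_eq _ hB]
    simp only [pvCmpRev]
    rw [if_neg h1, if_pos h]
  case case5 A B hA hB h1 h2 h ih =>
    have hpA := PySem.List.sorted_pairwise A (fun x => x)
    have hpB := PySem.List.sorted_pairwise B (fun x => x)
    have hnA : ∀ x ∈ PySem.List.sorted A (fun x => x) false, x < 0 :=
      fun x hx => lt_of_le_of_lt (pvLe_getLast hpA hA x hx) h.2
    have hnB : ∀ y ∈ PySem.List.sorted B (fun x => x) false, y < 0 :=
      fun y hy => lt_of_le_of_lt (pvLe_getLast hpB hB y hy) h.1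
    rw [last_letter_order_msp, dif_neg hA, dif_neg hB, if_neg h1, if_neg h2, dif_pos h, ih]
    unfold last_letter_order_msp_alt
    rw [pvSorted_map_neg _ hpA, pvSorted_map_neg _ hpB, List.reverse_reverse,
        List.reverse_reverse, pvCmpRev_map_neg _ _ hnA hnB,
        pvReverse_eq _ hA, pvReverse_eq _ hB]
    simp only [pvCmpRev]
    rw [if_neg h1, if_neg h2, if_pos h, ← pvReverse_eq _ hA, ← pvReverse_eq _ hB,
        List.reverse_reverse, List.reverse_reverse]
  case case6 A B hA hB h1 h2 h3 h =>
    rw [last_letter_order_msp, dif_neg hA, dif_neg hB, if_neg h1, if_neg h2, dif_neg h3, if_pos h]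
    unfold last_letter_order_msp_alt
    rw [pvReverse_eq _ hA, pvReverse_eq _ hB]
    simp only [pvCmpRev]
    rw [if_neg h1, if_neg h2, if_neg h3, if_pos h]
  case case7 A B hA hB h1 h2 h3 h4 h =>
    rw [last_letter_order_msp, dif_neg hA, dif_neg hB, if_neg h1, if_neg h2, dif_neg h3,
        if_neg h4, if_pos h]
    unfold last_letter_order_msp_alt
    rw [pvReverse_eq _ hA, pvReverse_eq _ hB]
    simp only [pvCmpRev]
    rw [if_neg h1, if_neg h2, if_neg h3, if_neg h4, if_pos h]
  case case8 A B hA hB h1 h2 h3 h4 h5 ih =>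
    have hpA := PySem.List.sorted_pairwise A (fun x => x)
    have hpB := PySem.List.sorted_pairwise B (fun x => x)
    rw [last_letter_order_msp, dif_neg hA, dif_neg hB, if_neg h1, if_neg h2, dif_neg h3,
        if_neg h4, if_neg h5, ih]
    unfold last_letter_order_msp_alt
    rw [PySem.List.slice_to_neg_one, PySem.List.slice_to_neg_one,
        pvSorted_dropLast _ hpA, pvSorted_dropLast _ hpB,
        pvReverse_eq _ hA, pvReverse_eq _ hB]
    simp only [pvCmpRev]
    rw [if_neg h1, if_neg h2, if_neg h3, if_neg h4, if_neg h5]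

-- ===== VERDICT (by name: the statement is the Claim_ definition above) =====
theorem last_letter_order_msp_spec : Claim_equal_last_letter_order_msp := by
  intro A B _
  unfold Spec_last_letter_order_msp
  exact pv_key A B
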